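-- pv_equiv track=rewrite | github.com/UJHa/Codeit-Study | 프로그래머스/(01) 2021 KAKAO BLIND RECRUITMENT/02)메뉴 리뉴얼/jinhwan.py | get_course_count
-- ===== SOURCE A (Python) =====
-- def get_course_count(orders, key):
--     result = 0
--
--     for order in orders:
--         can_make_course = True
--
--         for k in key:
--             if k not in order:
--                 can_make_course = False
--                 break
--
--         if can_make_course:
--             result += 1
--
--     return result
-- ===== SOURCE B (Python) =====
-- def get_course_count(orders, key):
--     # Inverted index: char -> set of indices of orders containing that char.
--     index = {}
--     for i, order in enumerate(orders):
--         for ch in order: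
--             if ch in index:
--                 index[ch].add(i)
--             else:
--                 index[ch] = {i}
--     survivors = set(range(len(orders)))
--     for ch in key:
--         survivors &= index.get(ch, set())
--     return len(survivors)
-- ===== Notes on version B (the rewrite author's own statement) =====
-- stated objective: alternative
-- what changed: Replaces the per-order membership scan (nested loop with a flag and break) by an inverted index built in one pass (char -> set of order indices) followed by intersecting the index sets of the key's characters and returning the intersection's size.
import Mathlib
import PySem

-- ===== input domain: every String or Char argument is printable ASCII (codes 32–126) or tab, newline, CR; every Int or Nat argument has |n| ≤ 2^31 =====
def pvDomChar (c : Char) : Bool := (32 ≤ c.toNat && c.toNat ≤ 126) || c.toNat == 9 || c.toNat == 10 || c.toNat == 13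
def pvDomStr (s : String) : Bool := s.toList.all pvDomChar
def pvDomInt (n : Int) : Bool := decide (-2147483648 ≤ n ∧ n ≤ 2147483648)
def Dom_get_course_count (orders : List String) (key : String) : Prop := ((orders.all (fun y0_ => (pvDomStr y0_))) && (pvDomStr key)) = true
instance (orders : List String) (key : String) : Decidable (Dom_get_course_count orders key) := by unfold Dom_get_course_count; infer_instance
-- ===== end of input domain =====

-- B replaces A's per-order membership scan by an inverted index (char -> set of
-- order indices) intersected over the key's characters; alternative decomposition, same result.


-- ===== PORT A =====
-- inner 'for k in key: if k not in order: can_make_course = False; break'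
-- ('k in order' is Python's substring test; k is a single character, PySem.Chars.isIn is exact)
def pvInnerA (order : List Char) : List Char → Bool
  | [] => true
  | k :: ks => if PySem.Chars.isIn [k] order = false then false else pvInnerA order ks

def get_course_count (orders : List String) (key : String) : Int :=
  orders.foldl (fun result order =>
    let can_make_course := pvInnerA order.toList key.toList
    if can_make_course then result + 1 else result) 0

-- ===== PORT B =====
-- 'if ch in index: index[ch].add(i) else: index[ch] = {i}'
def pvAddIndex (d : PySem.Dict Char (PySem.Set Int)) (i : Int) (ch : Char) :
    PySem.Dict Char (PySem.Set Int) :=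
  match d.get? ch with
  | some s => d.insert ch (PySem.Set.add s i)
  | none   => d.insert ch (PySem.Set.ofList [i])

-- 'for i, order in enumerate(orders): for ch in order: …'
def pvBuildIndex (orders : List String) : PySem.Dict Char (PySem.Set Int) :=
  (PySem.List.enumerate orders 0).foldl
    (fun d p => p.2.toList.foldl (fun d ch => pvAddIndex d p.1 ch) d) PySem.Dict.empty

def get_course_count_alt (orders : List String) (key : String) : Int :=
  let index := pvBuildIndex orders
  -- survivors = set(range(len(orders))); for ch in key: survivors &= index.get(ch, set())
  let survivors := key.toList.foldl
    (fun s ch => PySem.Set.inter s (index.getD ch PySem.Set.empty))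
    (PySem.List.pyRange 0 (orders.length : Int))
  PySem.Set.len survivors

-- ===== PRECONDITION & SPEC =====
def Spec_get_course_count (orders : List String) (key : String) (out : Int) : Prop := out = get_course_count_alt orders key
instance (orders : List String) (key : String) (out : Int) : Decidable (Spec_get_course_count orders key out) := by unfold Spec_get_course_count; infer_instance

-- ===== CLAIM (what is proved, stated in full; the proofs are below) =====
def Claim_equal_get_course_count : Prop := ∀ (orders : List String) (key : String), Dom_get_course_count orders key → Spec_get_course_count orders key (get_course_count orders key)

-- ===== LEMMAS AND PROOFS =====

theorem pv_infix_singleton (k : Char) (l : List Char) : [k] <:+: l ↔ k ∈ l := by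
  constructor
  · intro h; exact (List.singleton_sublist).mp h.sublist
  · intro h
    obtain ⟨s, t, rfl⟩ := List.append_of_mem h
    exact ⟨s, t, by simp⟩

theorem pv_isIn_singleton (k : Char) (l : List Char) :
    PySem.Chars.isIn [k] l = decide (k ∈ l) := by
  have h := PySem.Chars.isIn_iff_infix [k] l
  rw [pv_infix_singleton] at h
  cases hh : PySem.Chars.isIn [k] l
  · rw [hh] at h
    simp only [Bool.false_eq_true, false_iff] at h
    simp [h]
  · rw [hh] at h
    simp [h.mp rfl]

theorem pv_innerA_eq (order : List Char) (ks : List Char) :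
    pvInnerA order ks = ks.all (fun k => decide (k ∈ order)) := by
  induction ks with
  | nil => rfl
  | cons k ks ih =>
      simp [pvInnerA, pv_isIn_singleton, List.all_cons, ih]

-- membership in one pvAddIndex step
theorem pv_mem_addIndex (d : PySem.Dict Char (PySem.Set Int)) (i : Int) (c ch : Char) (x : Int) :
    x ∈ (pvAddIndex d i c).getD ch PySem.Set.empty ↔
      x ∈ d.getD ch PySem.Set.empty ∨ (ch = c ∧ x = i) := by
  unfold pvAddIndex
  cases h : d.get? c with
  | some s =>
      simp only [PySem.Dict.getD_insert]
      by_cases hc : ch = c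
      · subst hc
        simp [PySem.Dict.getD, h, PySem.Set.mem_add]
      · simp [hc]
  | none =>
      simp only [PySem.Dict.getD_insert]
      by_cases hc : ch = c
      · subst hc
        simp [PySem.Dict.getD, h, PySem.Set.ofList, PySem.Set.add, PySem.Set.empty,
              PySem.Set.contains]
      · simp [hc]

-- membership after the inner loop over the characters of one order
theorem pv_mem_innerFold (cs : List Char) (d : PySem.Dict Char (PySem.Set Int)) (i : Int)
    (ch : Char) (x : Int) :
    x ∈ (cs.foldl (fun d c => pvAddIndex d i c) d).getD ch PySem.Set.empty ↔
      x ∈ d.getD ch PySem.Set.empty ∨ (ch ∈ cs ∧ x = i) := by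
  induction cs generalizing d with
  | nil => simp
  | cons c cs ih =>
      simp only [List.foldl_cons, ih, pv_mem_addIndex, List.mem_cons]
      tauto

-- membership after the whole index-building loop
theorem pv_mem_buildFold (pairs : List (Int × String)) (d : PySem.Dict Char (PySem.Set Int))
    (ch : Char) (x : Int) :
    x ∈ (pairs.foldl (fun d p => p.2.toList.foldl (fun d c => pvAddIndex d p.1 c) d) d).getD ch PySem.Set.empty ↔
      x ∈ d.getD ch PySem.Set.empty ∨ ∃ p ∈ pairs, x = p.1 ∧ ch ∈ p.2.toList := by
  induction pairs generalizing d with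
  | nil => simp
  | cons p ps ih =>
      simp only [List.foldl_cons, ih, pv_mem_innerFold, List.mem_cons]
      constructor
      · rintro (⟨h | ⟨hc, hx⟩⟩ | ⟨q, hq, hx, hc⟩)
        · exact Or.inl h
        · exact Or.inr ⟨p, Or.inl rfl, hx, hc⟩
        · exact Or.inr ⟨q, Or.inr hq, hx, hc⟩
      · rintro (h | ⟨q, (rfl | hq), hx, hc⟩)
        · exact Or.inl (Or.inl h)
        · exact Or.inl (Or.inr ⟨hc, hx⟩)
        · exact Or.inr ⟨q, hq, hx, hc⟩

theorem pv_mem_index (orders : List String) (ch : Char) (x : Int) :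
    x ∈ (pvBuildIndex orders).getD ch PySem.Set.empty ↔
      ∃ (k : Nat) (h : k < orders.length), x = (k : Int) ∧ ch ∈ orders[k].toList := by
  unfold pvBuildIndex
  rw [pv_mem_buildFold]
  constructor
  · rintro (h | ⟨p, hp, hx, hc⟩)
    · simp [PySem.Dict.getD, PySem.Dict.get?_empty, PySem.Set.empty] at h
    · obtain ⟨k, hk, rfl⟩ := (PySem.List.mem_enumerate_iff orders 0 p).mp hp
      exact ⟨k, hk, by simpa using hx, by simpa using hc⟩
  · rintro ⟨k, hk, hx, hc⟩
    exact Or.inr ⟨((k : Int), orders[k]),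
      (PySem.List.mem_enumerate_iff orders 0 _).mpr ⟨k, hk, by simp⟩, hx, hc⟩

-- the intersection fold is a filter
theorem pv_interFold (idx : PySem.Dict Char (PySem.Set Int)) (cs : List Char) (s0 : List Int) :
    cs.foldl (fun s ch => PySem.Set.inter s (idx.getD ch PySem.Set.empty)) s0 =
      s0.filter (fun x => cs.all (fun ch => (idx.getD ch PySem.Set.empty).contains x)) := by
  induction cs generalizing s0 with
  | nil => simp
  | cons c cs ih =>
      rw [List.foldl_cons, ih]
      show List.filter _ (List.filter _ s0) = _
      rw [List.filter_filter]
      apply List.filter_congr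
      intro x _
      simp [List.all_cons, Bool.and_comm]

-- counting over range by lookup  = counting over the list
theorem pv_countP_range (orders : List String) (p : String → Bool) :
    List.countP (fun k => p (orders.getD k "")) (List.range orders.length) =
      List.countP p orders := by
  induction orders using List.reverseRecOn with
  | nil => simp
  | append_singleton os o ih =>
      have hlen : (os ++ [o]).length = os.length + 1 := by simp
      rw [hlen, List.range_succ, List.countP_append, List.countP_append]
      have h1 : List.countP (fun k => p ((os ++ [o]).getD k "")) (List.range os.length) =
          List.countP (fun k => p (os.getD k "")) (List.range os.length) := by
        apply List.countP_congr
        intro k hk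
        have hk' : k < os.length := List.mem_range.mp hk
        have : (os ++ [o]).getD k "" = os.getD k "" := by
          unfold List.getD
          rw [List.getElem?_append_left hk']
        rw [this]
      have h2 : (os ++ [o]).getD os.length "" = o := by
        unfold List.getD
        rw [List.getElem?_concat_length]
        rfl
      rw [h1, ih]
      simp [List.countP_cons]

theorem pv_A_eq_countP (orders : List String) (key : String) :
    get_course_count orders key =
      (List.countP (fun o => key.toList.all (fun k => decide (k ∈ o.toList))) orders : Int) := by
  unfold get_course_count
  simp only [pv_innerA_eq]
  rw [PySem.List.foldl_count_if (fun o => key.toList.all (fun k => decide (k ∈ o.toList))) orders 0]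
  simp

-- ===== VERDICT (by name: the statement is the Claim_ definition above) =====
theorem pv_index_contains (orders : List String) (k : Nat) (hk : k < orders.length) (ch : Char) :
    ((pvBuildIndex orders).getD ch PySem.Set.empty).contains ((k : Nat) : Int) =
      decide (ch ∈ (orders.getD k "").toList) := by
  have hmem := pv_mem_index orders ch ((k : Nat) : Int)
  have hcd : (((pvBuildIndex orders).getD ch PySem.Set.empty).contains ((k : Nat) : Int)) =
      decide (((k : Nat) : Int) ∈ (pvBuildIndex orders).getD ch PySem.Set.empty) := by
    simp [PySem.Set.contains]
  rw [hcd, List.getD_eq_getElem orders "" hk, decide_eq_decide, hmem]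
  constructor
  · rintro ⟨k', hk', hx, hc⟩
    have : k' = k := by exact_mod_cast hx.symm
    subst this; exact hc
  · intro hc; exact ⟨k, hk, rfl, hc⟩

theorem get_course_count_spec : Claim_equal_get_course_count := by
  intro orders key _
  unfold Spec_get_course_count
  rw [pv_A_eq_countP]
  simp only [get_course_count_alt]
  rw [pv_interFold, PySem.Set.len, PySem.List.pyRange_zero_natCast orders.length,
      List.filter_map, List.length_map, ← List.countP_eq_length_filter]
  have hc : List.countP
      ((fun x => key.toList.all (fun ch => ((pvBuildIndex orders).getD ch PySem.Set.empty).contains x)) ∘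
        (fun k : Nat => (k : Int)))
      (List.range orders.length) =
      List.countP (fun k => (fun o => key.toList.all (fun c => decide (c ∈ o.toList))) (orders.getD k ""))
      (List.range orders.length) := by
    apply List.countP_congr
    intro k hk
    have hk' : k < orders.length := List.mem_range.mp hk
    simp only [Function.comp]
    rw [List.all_congr rfl (fun ch => pv_index_contains orders k hk' ch)]
  rw [hc]
  norm_cast
  exact (pv_countP_range orders (fun o => key.toList.all fun k => decide (k ∈ o.toList))).symm
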